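-- pv_equiv track=rewrite | github.com/microsoft/nlp-recipes | utils_nlp/models/mtdnn/common/squad_utils.py | doc_split
-- ===== SOURCE A (Python) =====
-- import collections
--
-- def doc_split(doc_subwords, doc_stride=180, max_tokens_for_doc=384):
--     _DocSpan = collections.namedtuple("DocSpan", ["start", "length"])
--     doc_spans = []
--     start_offset = 0
--     while start_offset < len(doc_subwords):
--         length = len(doc_subwords) - start_offset
--         if length > max_tokens_for_doc:
--             length = max_tokens_for_doc
--         doc_spans.append(_DocSpan(start=start_offset, length=length))
--         if start_offset + length == len(doc_subwords):
--             break
--         start_offset += min(length, doc_stride)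
--     return doc_spans
-- ===== SOURCE B (Python) =====
-- import collections
--
-- def doc_split(doc_subwords, doc_stride=180, max_tokens_for_doc=384):
--     _DocSpan = collections.namedtuple("DocSpan", ["start", "length"])
--     n = len(doc_subwords)
--     if n == 0:
--         return []
--     if n <= max_tokens_for_doc:
--         return [_DocSpan(start=0, length=n)]
--     s = min(max_tokens_for_doc, doc_stride)
--     num_spans = (n - max_tokens_for_doc + s - 1) // s + 1
--     return [_DocSpan(start=i * s, length=min(n - i * s, max_tokens_for_doc))
--             for i in range(num_spans)]
-- ===== Notes on version B (the rewrite author's own statement) =====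
-- stated objective: simpler
-- what changed: Replaced the stateful while-loop with running start_offset/branch/break by a closed-form span count (integer ceiling division) and a comprehension whose spans (i*s, min(n-i*s, max)) are computed independently; Pre_ excludes only the inputs on which A's while loop never terminates (more tokens than one span holds together with a non-positive step).
import Mathlib
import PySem

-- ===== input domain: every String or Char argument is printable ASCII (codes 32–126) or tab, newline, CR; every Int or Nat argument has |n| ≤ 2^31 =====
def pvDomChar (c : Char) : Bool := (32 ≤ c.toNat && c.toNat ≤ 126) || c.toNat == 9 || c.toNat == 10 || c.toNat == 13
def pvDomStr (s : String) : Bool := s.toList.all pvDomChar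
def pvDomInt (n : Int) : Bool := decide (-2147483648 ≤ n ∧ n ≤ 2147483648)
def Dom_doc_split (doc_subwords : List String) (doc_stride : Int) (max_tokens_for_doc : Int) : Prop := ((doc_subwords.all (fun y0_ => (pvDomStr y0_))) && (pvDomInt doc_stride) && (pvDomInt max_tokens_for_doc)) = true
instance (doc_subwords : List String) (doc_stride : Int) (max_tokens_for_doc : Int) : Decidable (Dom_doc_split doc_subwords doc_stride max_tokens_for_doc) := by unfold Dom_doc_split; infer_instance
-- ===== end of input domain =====

-- ===== PORT A =====
-- Header: B computes the sliding-window spans by a closed-form span count + comprehension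
-- instead of A's stateful loop (objective: simpler); equal on all inputs where A terminates.
def docSplitLoopA (n maxT stride : Int) : Nat → Int → List (Int × Int) → List (Int × Int)
  | 0, _, acc => acc
  | fuel+1, start, acc =>
    if start < n then
      let length0 := n - start
      let length := if length0 > maxT then maxT else length0
      let acc' := acc ++ [(start, length)]
      if start + length = n then acc'
      else docSplitLoopA n maxT stride fuel (start + min length stride) acc'
    else acc

def doc_split (doc_subwords : List String) (doc_stride : Int) (max_tokens_for_doc : Int) : List (Int × Int) :=
  docSplitLoopA (doc_subwords.length : Int) max_tokens_for_doc doc_stride (doc_subwords.length + 1) 0 []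

-- ===== PORT B =====
def doc_split_alt (doc_subwords : List String) (doc_stride : Int) (max_tokens_for_doc : Int) : List (Int × Int) :=
  let n : Int := doc_subwords.length
  if n = 0 then []
  else if n ≤ max_tokens_for_doc then [(0, n)]
  else
    let s := min max_tokens_for_doc doc_stride
    let num_spans := PySem.Int.floordiv (n - max_tokens_for_doc + s - 1) s + 1
    (PySem.List.pyRange 0 num_spans 1).map
      (fun i => (i * s, min (n - i * s) max_tokens_for_doc))

-- ===== PRECONDITION & SPEC =====
-- Pre_ excludes exactly the inputs on which A's while loop never terminates: more tokens than
-- fit in one span combined with a non-positive step min(length, doc_stride); A returns no value there.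
def Pre_doc_split (doc_subwords : List String) (doc_stride : Int) (max_tokens_for_doc : Int) : Prop :=
  doc_subwords = [] ∨ (doc_subwords.length : Int) ≤ max_tokens_for_doc ∨
    (0 < doc_stride ∧ 0 < max_tokens_for_doc)
instance (doc_subwords : List String) (doc_stride : Int) (max_tokens_for_doc : Int) : Decidable (Pre_doc_split doc_subwords doc_stride max_tokens_for_doc) := by unfold Pre_doc_split; infer_instance
def pvWitness_doc_split : List String × Int × Int := (["a", "b", "c"], 2, 2)
def Spec_doc_split (doc_subwords : List String) (doc_stride : Int) (max_tokens_for_doc : Int) (out : List (Int × Int)) : Prop := out = doc_split_alt doc_subwords doc_stride max_tokens_for_doc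
instance (doc_subwords : List String) (doc_stride : Int) (max_tokens_for_doc : Int) (out : List (Int × Int)) : Decidable (Spec_doc_split doc_subwords doc_stride max_tokens_for_doc out) := by unfold Spec_doc_split; infer_instance

-- ===== CLAIM (what is proved, stated in full; the proofs are below) =====
def Claim_equal_doc_split : Prop := ∀ (doc_subwords : List String) (doc_stride : Int) (max_tokens_for_doc : Int), Dom_doc_split doc_subwords doc_stride max_tokens_for_doc → Pre_doc_split doc_subwords doc_stride max_tokens_for_doc → Spec_doc_split doc_subwords doc_stride max_tokens_for_doc (doc_split doc_subwords doc_stride max_tokens_for_doc)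

-- ===== LEMMAS AND PROOFS =====

theorem loop_eq (n maxT stride s : Int) (hs : s = min maxT stride)
    (hs0 : 0 < s) :
    ∀ (fuel : Nat) (i k : Int) (acc : List (Int × Int)),
      0 ≤ i → i ≤ k →
      n - k * s ≤ maxT → 0 < n - k * s →
      (∀ j, i ≤ j → j < k → maxT < n - j * s) →
      (k - i).toNat < fuel →
      docSplitLoopA n maxT stride fuel (i * s) acc =
        acc ++ (PySem.List.pyRange i (k + 1) 1).map
          (fun j => (j * s, min (n - j * s) maxT)) := by
  intro fuel
  induction fuel with
  | zero => intro i k acc _ _ _ _ _ hf; omega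
  | succ fuel ih =>
    intro i k acc hi hik hk1 hk2 hmono hf
    have hiks : i * s ≤ k * s := by
      have := mul_nonneg (show (0:Int) ≤ k - i by omega) (le_of_lt hs0)
      nlinarith
    have hstart : i * s < n := by omega
    rcases lt_or_eq_of_le hik with hlt | heq
    · -- i < k : full span of length maxT, then recurse
      have hbig : maxT < n - i * s := hmono i le_rfl hlt
      have hstep : min maxT stride = s := hs.symm
      have hrec := ih (i + 1) k (acc ++ [(i * s, maxT)]) (by omega) (by omega) hk1 hk2
        (fun j hj hjk => hmono j (by omega) hjk) (by omega)
      have hcons : PySem.List.pyRange i (k + 1) 1 =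
          i :: PySem.List.pyRange (i + 1) (k + 1) 1 :=
        PySem.List.pyRange_one_cons (by omega)
      simp only [docSplitLoopA, if_pos hstart]
      have hlen : (if n - i * s > maxT then maxT else n - i * s) = maxT := if_pos hbig
      simp only [hlen]
      rw [if_neg (by omega), hstep]
      have harg : i * s + s = (i + 1) * s := by ring
      rw [harg, hrec, hcons]
      simp only [List.map_cons, List.append_assoc, List.cons_append, List.nil_append]
      have : min (n - i * s) maxT = maxT := min_eq_right (le_of_lt hbig)
      rw [this]
    · -- i = k : last span, break
      subst heq
      simp only [docSplitLoopA, if_pos hstart]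
      have hlen : (if n - i * s > maxT then maxT else n - i * s) = n - i * s :=
        if_neg (by omega)
      simp only [hlen]
      rw [if_pos (by ring)]
      have hcons : PySem.List.pyRange i (i + 1) 1 =
          i :: PySem.List.pyRange (i + 1) (i + 1) 1 :=
        PySem.List.pyRange_one_cons (by omega)
      have hnil : PySem.List.pyRange (i + 1) (i + 1) 1 = [] := by
        have := PySem.List.length_pyRange_one (i + 1) (i + 1)
        cases h : PySem.List.pyRange (i + 1) (i + 1) 1 with
        | nil => rfl
        | cons a l => rw [h] at this; simp at this
      rw [hcons, hnil]
      have : min (n - i * s) maxT = n - i * s := min_eq_left (by omega)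
      simp [this]

-- ===== VERDICT (by name: the statement is the Claim_ definition above) =====
theorem doc_split_spec : Claim_equal_doc_split := by
  intro ds stride maxT _ hpre
  unfold Spec_doc_split doc_split doc_split_alt
  set n : Int := (ds.length : Int) with hn
  have hn0 : 0 ≤ n := by positivity
  by_cases hz : n = 0
  · -- empty document
    have hl : ds.length = 0 := by omega
    rcases List.length_eq_zero_iff.mp hl with rfl
    simp [docSplitLoopA, hn]
  · by_cases hle : n ≤ maxT
    · -- single span
      rw [if_neg hz, if_pos hle]
      simp only [docSplitLoopA, sub_zero, gt_iff_lt]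
      rw [if_pos (show (0:Int) < n by omega), if_neg (show ¬ maxT < n by omega),
        if_pos (show (0:Int) + n = n by ring)]
      rfl
    · -- multi-span case: 0 < stride, 0 < maxT
      have hcond : 0 < stride ∧ 0 < maxT := by
        rcases hpre with h | h | h
        · exact absurd (by simp [hn, h] : n = 0) hz
        · exact absurd h hle
        · exact h
      obtain ⟨hstr, hmx⟩ := hcond
      set s : Int := min maxT stride with hsdef
      have hs0 : 0 < s := lt_min hmx hstr
      have hsm : s ≤ maxT := min_le_left _ _
      rw [if_neg hz, if_neg hle]
      set k : Int := PySem.Int.floordiv (n - maxT + s - 1) s with hkdef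
      have hfd : k = (n - maxT + s - 1) / s := by
        rw [hkdef, PySem.Int.floordiv_eq_ediv_of_pos hs0]
      have hdm := Int.mul_ediv_add_emod (n - maxT + s - 1) s
      have hr1 := Int.emod_nonneg (n - maxT + s - 1) (ne_of_gt hs0)
      have hr2 := Int.emod_lt_of_pos (n - maxT + s - 1) hs0
      set r : Int := (n - maxT + s - 1) % s with hrdef
      have hks : s * k + r = n - maxT + s - 1 := by rw [hfd]; exact hdm
      have hub : n - k * s ≤ maxT := by nlinarith
      have hlb : maxT - s < n - k * s := by nlinarith
      have hpos : 0 < n - k * s := by omega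
      have hk0 : 0 < k := by
        by_cases h : k ≤ 0
        · have : k * s ≤ 0 := mul_nonpos_of_nonpos_of_nonneg h (le_of_lt hs0)
          omega
        · omega
      have hmono : ∀ j, (0:Int) ≤ j → j < k → maxT < n - j * s := by
        intro j _ hjk
        have := mul_nonneg (show (0:Int) ≤ k - 1 - j by omega) (le_of_lt hs0)
        nlinarith
      have hkn : k ≤ n := by nlinarith
      have hfuel : (k - 0).toNat < ds.length + 1 := by omega
      have := loop_eq n maxT stride s hsdef hs0 (ds.length + 1) 0 k []
        le_rfl (le_of_lt hk0) hub hpos hmono hfuel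
      simpa using this
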